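-- pv_equiv track=rewrite | github.com/leonedott/ven_name_generator | ven_name/toolbox_primer_nombre.py | exc_02
-- ===== SOURCE A (Python) =====
-- def exc_02(variable, choice):
--     '''
--     EN: Exceptions for the second consonant of the first syllable.
--     ES: Excepciones para la elección de la segunda consonante en la primera sílaba.
--     '''
--     para_s = ['u', 'a', 'o']
--     para_ss = ['kl', 'f', 'rr', 'cl', 'y']
--     para_z = ['rr', 'kl']
--     para_r = ['r', 'rr', 'kl', 'f']
--     para_l = ['l', 'll']
--     para_ll = ['n', 'nn']
--
--     l_ll = ['l', 'll']
--     if 's' in variable and any(x in choice for x in para_s):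
--         return False
--     elif 'ss' in variable and any(x in choice for x in para_ss):
--         return False
--     elif 'z' in variable and 'rr' in choice:
--         return False
--     elif 'x' in variable and any(x in choice for x in para_z):
--          return False
--     elif 'r' in variable and any(x in choice for x in para_r):
--         return False
--     elif 'n' in variable and 'rr' in choice:
--         return False
--     elif any(x in variable for x in l_ll) and any(x in choice for x in para_l):
--         return False
--     elif 'y' in variable and 'nn' in choice:
--         return False
--     elif 'll' in variable and any(x in choice for x in para_ll):
--         return False
--     else:
--         return True
-- ===== SOURCE B (Python) =====
-- # EN: Exceptions for the second consonant of the first syllable.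
-- # Two-phase approach: index which tokens occur, then test the cross product
-- # against a flat set of forbidden (variable-token, choice-token) pairs.
-- _FORBIDDEN = {
--     ('s', 'u'), ('s', 'a'), ('s', 'o'),
--     ('ss', 'kl'), ('ss', 'f'), ('ss', 'rr'), ('ss', 'cl'), ('ss', 'y'),
--     ('z', 'rr'),
--     ('x', 'rr'), ('x', 'kl'),
--     ('r', 'r'), ('r', 'rr'), ('r', 'kl'), ('r', 'f'),
--     ('n', 'rr'),
--     ('l', 'l'), ('l', 'll'),
--     ('ll', 'l'), ('ll', 'll'), ('ll', 'n'), ('ll', 'nn'),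
--     ('y', 'nn'),
-- }
-- _V_TOKENS = ('s', 'ss', 'z', 'x', 'r', 'n', 'l', 'll', 'y')
-- _C_TOKENS = ('u', 'a', 'o', 'kl', 'f', 'rr', 'cl', 'y', 'r', 'l', 'll', 'n', 'nn')
--
--
-- def exc_02(variable, choice):
--     '''
--     EN: Exceptions for the second consonant of the first syllable.
--     ES: Excepciones para la eleccion de la segunda consonante en la primera silaba.
--     '''
--     v_found = [t for t in _V_TOKENS if t in variable]
--     c_found = [t for t in _C_TOKENS if t in choice]
--     return all((v, c) not in _FORBIDDEN for v in v_found for c in c_found)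
-- ===== Notes on version B (the rewrite author's own statement) =====
-- stated objective: alternative
-- what changed: Replaced the nine-way if/elif chain of substring tests by a two-phase algorithm: first index which variable-tokens and choice-tokens occur in the inputs, then check the cross product of found tokens against one flat set of 23 forbidden (variable-token, choice-token) pairs; correct because every hit branch of A returns False, so the result is just 'no forbidden pair is present'.
import Mathlib
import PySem

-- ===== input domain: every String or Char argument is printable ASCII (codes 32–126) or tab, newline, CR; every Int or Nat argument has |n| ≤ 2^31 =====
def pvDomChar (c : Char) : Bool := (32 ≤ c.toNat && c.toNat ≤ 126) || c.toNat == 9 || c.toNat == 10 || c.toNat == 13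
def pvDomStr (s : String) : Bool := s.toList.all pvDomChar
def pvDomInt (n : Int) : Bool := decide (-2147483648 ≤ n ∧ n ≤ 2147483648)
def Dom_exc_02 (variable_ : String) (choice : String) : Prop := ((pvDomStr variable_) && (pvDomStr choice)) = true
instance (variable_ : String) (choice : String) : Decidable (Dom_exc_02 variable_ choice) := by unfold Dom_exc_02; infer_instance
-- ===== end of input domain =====

-- B replaces A's nine-way if/elif chain by a two-phase token index checked against a flat forbidden-pair set (objective: alternative).
-- ===== PORT A =====
def exc_02 (variable_ : String) (choice : String) : Bool :=
  let para_s := ["u", "a", "o"]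
  let para_ss := ["kl", "f", "rr", "cl", "y"]
  let para_z := ["rr", "kl"]
  let para_r := ["r", "rr", "kl", "f"]
  let para_l := ["l", "ll"]
  let para_ll := ["n", "nn"]
  let l_ll := ["l", "ll"]
  if PySem.Str.isIn "s" variable_ && para_s.any (fun x => PySem.Str.isIn x choice) then
    false
  else if PySem.Str.isIn "ss" variable_ && para_ss.any (fun x => PySem.Str.isIn x choice) then
    false
  else if PySem.Str.isIn "z" variable_ && PySem.Str.isIn "rr" choice then
    false
  else if PySem.Str.isIn "x" variable_ && para_z.any (fun x => PySem.Str.isIn x choice) then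
    false
  else if PySem.Str.isIn "r" variable_ && para_r.any (fun x => PySem.Str.isIn x choice) then
    false
  else if PySem.Str.isIn "n" variable_ && PySem.Str.isIn "rr" choice then
    false
  else if l_ll.any (fun x => PySem.Str.isIn x variable_) && para_l.any (fun x => PySem.Str.isIn x choice) then
    false
  else if PySem.Str.isIn "y" variable_ && PySem.Str.isIn "nn" choice then
    false
  else if PySem.Str.isIn "ll" variable_ && para_ll.any (fun x => PySem.Str.isIn x choice) then
    false
  else
    true

-- ===== PORT B =====
def excForbidden : List (String × String) :=
  [("s", "u"), ("s", "a"), ("s", "o"),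
   ("ss", "kl"), ("ss", "f"), ("ss", "rr"), ("ss", "cl"), ("ss", "y"),
   ("z", "rr"),
   ("x", "rr"), ("x", "kl"),
   ("r", "r"), ("r", "rr"), ("r", "kl"), ("r", "f"),
   ("n", "rr"),
   ("l", "l"), ("l", "ll"),
   ("ll", "l"), ("ll", "ll"), ("ll", "n"), ("ll", "nn"),
   ("y", "nn")]

def excVTokens : List String := ["s", "ss", "z", "x", "r", "n", "l", "ll", "y"]

def excCTokens : List String :=
  ["u", "a", "o", "kl", "f", "rr", "cl", "y", "r", "l", "ll", "n", "nn"]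

def exc_02_alt (variable_ : String) (choice : String) : Bool :=
  let vFound := excVTokens.filter (fun t => PySem.Str.isIn t variable_)
  let cFound := excCTokens.filter (fun t => PySem.Str.isIn t choice)
  (vFound.flatMap (fun v => cFound.map (fun c => (v, c)))).all
    (fun p => !(excForbidden.contains p))

-- ===== PRECONDITION & SPEC =====
def Spec_exc_02 (variable_ : String) (choice : String) (out : Bool) : Prop := out = exc_02_alt variable_ choice
instance (variable_ : String) (choice : String) (out : Bool) : Decidable (Spec_exc_02 variable_ choice out) := by unfold Spec_exc_02; infer_instance

-- ===== CLAIM (what is proved, stated in full; the proofs are below) =====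
def Claim_equal_exc_02 : Prop := ∀ (variable_ : String) (choice : String), Dom_exc_02 variable_ choice → Spec_exc_02 variable_ choice (exc_02 variable_ choice)

-- ===== LEMMAS AND PROOFS =====

-- Every hit branch of A returns false, so the if/elif chain is the negated disjunction of its conditions.
theorem exc02_chain (c1 c2 c3 c4 c5 c6 c7 c8 c9 : Bool) :
    (if c1 then false else if c2 then false else if c3 then false else if c4 then false
     else if c5 then false else if c6 then false else if c7 then false else if c8 then false
     else if c9 then false else true)
      = !(c1 || (c2 || (c3 || (c4 || (c5 || (c6 || (c7 || (c8 || c9)))))))) := by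
  revert c1 c2 c3 c4 c5 c6 c7 c8 c9; decide

-- Prod's BEq unfolds componentwise (definitional).
theorem exc02_prodBeq (a b c d : String) : ((a, b) == (c, d)) = (a == c && b == d) := rfl

-- De Morgan collectors turning B's conjunctive normal form back into a negated disjunction.
theorem exc02_n1 (v c1 : Bool) : (!v || !c1) = !(v && c1) := by revert v c1; decide
theorem exc02_n2 (v c1 c2 : Bool) : (!v || !c1 && !c2) = !(v && (c1 || c2)) := by
  revert v c1 c2; decide
theorem exc02_n3 (v c1 c2 c3 : Bool) :
    (!v || !c1 && (!c2 && !c3)) = !(v && (c1 || (c2 || c3))) := by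
  revert v c1 c2 c3; decide
theorem exc02_n4 (v c1 c2 c3 c4 : Bool) :
    (!v || !c1 && (!c2 && (!c3 && !c4))) = !(v && (c1 || (c2 || (c3 || c4)))) := by
  revert v c1 c2 c3 c4; decide
theorem exc02_n5 (v c1 c2 c3 c4 c5 : Bool) :
    (!v || !c1 && (!c2 && (!c3 && (!c4 && !c5)))) = !(v && (c1 || (c2 || (c3 || (c4 || c5))))) := by
  revert v c1 c2 c3 c4 c5; decide
theorem exc02_deMorgan9 (b1 b2 b3 b4 b5 b6 b7 b8 b9 : Bool) :
    (!b1 && (!b2 && (!b3 && (!b4 && (!b5 && (!b6 && (!b7 && (!b8 && !b9)))))))) =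
      !(b1 || (b2 || (b3 || (b4 || (b5 || (b6 || (b7 || (b8 || b9)))))))) := by
  revert b1 b2 b3 b4 b5 b6 b7 b8 b9; decide

-- Commutations of the choice-token order inside one rule.
theorem exc02_comm2 (v a b : Bool) : (v && (a || b)) = (v && (b || a)) := by revert v a b; decide
theorem exc02_comm4 (v a b c d : Bool) :
    (v && (a || (b || (c || d)))) = (v && (c || (d || (b || a)))) := by
  revert v a b c d; decide
-- A's l/ll/y rule block equals B's per-token grouping (distribute over l, ll; reorder y last).
theorem exc02_tail (l ll y lc llc nc nnc : Bool) :
    ((l || ll) && (lc || llc) || (y && nnc || ll && (nc || nnc))) =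
      (l && (lc || llc) || (ll && (lc || (llc || (nc || nnc))) || y && nnc)) := by
  revert l ll y lc llc nc nnc; decide

-- ===== VERDICT (by name: the statement is the Claim_ definition above) =====
theorem exc_02_spec : Claim_equal_exc_02 := by
  intro var ch _
  unfold Spec_exc_02 exc_02 exc_02_alt excForbidden excVTokens excCTokens
  simp only [List.all_flatMap, List.all_map, List.all_filter, Function.comp,
    List.all_cons, List.all_nil, List.contains_cons, List.contains_nil,
    List.any_cons, List.any_nil, Bool.or_false, Bool.and_true]
  simp only [exc02_prodBeq, String.reduceBEq, Bool.and_true, Bool.and_false,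
    Bool.true_and, Bool.or_true, Bool.or_false, Bool.not_true, Bool.not_false]
  rw [exc02_chain]
  rw [exc02_n3, exc02_n5, exc02_n1, exc02_n2, exc02_n4, exc02_n1, exc02_n2, exc02_n4, exc02_n1]
  rw [exc02_deMorgan9]
  rw [exc02_comm2 (PySem.Str.isIn "x" var) (PySem.Str.isIn "rr" ch) (PySem.Str.isIn "kl" ch)]
  rw [exc02_comm4 (PySem.Str.isIn "r" var) (PySem.Str.isIn "r" ch) (PySem.Str.isIn "rr" ch)
    (PySem.Str.isIn "kl" ch) (PySem.Str.isIn "f" ch)]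
  rw [exc02_tail (PySem.Str.isIn "l" var) (PySem.Str.isIn "ll" var) (PySem.Str.isIn "y" var)
    (PySem.Str.isIn "l" ch) (PySem.Str.isIn "ll" ch) (PySem.Str.isIn "n" ch)
    (PySem.Str.isIn "nn" ch)]
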